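-- pv_equiv track=rewrite | github.com/JuruoMP/T5-SR | rerank/run_rerank.py | concatate_value
-- ===== SOURCE A (Python) =====
-- def concatate_value(pre_list):
--     collect_list,pre_list_new = [],[]
--     flag, tag = False, False
--     for item in pre_list:
--         if "'" not in item and '"' not in item and flag == False:
--             pre_list_new.append(item)
--         elif "'" in item or '"' in item or flag == True:
--             denote_len = 0
--             if "'" in item:
--                 denote_len = len([i for i, x in enumerate(list(item)) if x == "'"])
--             elif '"' in item:
--                 denote_len = len([i for i, x in enumerate(list(item)) if x == '"'])
--             if denote_len == 2:
--                 pre_list_new.append(item)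
--             else:
--                 if flag == True and denote_len == 1:
--                     collect_list.append(item)
--                     flag = False
--                     tag = True
--                 else:
--                     flag = True
--                     collect_list.append(item)
--         if flag == False and tag == True:
--             pre_list_new.append(" ".join(collect_list))
--             tag = False
--             collect_list = []
--     return pre_list_new
-- ===== SOURCE B (Python) =====
-- def concatate_value(pre_list):
--     def qcount(item):
--         if "'" in item:
--             return sum(1 for ch in item if ch == "'")
--         if '"' in item:
--             return sum(1 for ch in item if ch == '"')
--         return 0
--
--     counts = [qcount(x) for x in pre_list]
--     out = []
--     i, n = 0, len(pre_list)
--     while i < n: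
--         c = counts[i]
--         if c == 0 or c == 2:
--             out.append(pre_list[i])
--             i += 1
--             continue
--         # opener: collect a quoted span until an item with exactly one quote closes it
--         buf = [pre_list[i]]
--         passthrough = []
--         j = i + 1
--         while j < n and counts[j] != 1:
--             if counts[j] == 2:
--                 passthrough.append(pre_list[j])
--             else:
--                 buf.append(pre_list[j])
--             j += 1
--         out.extend(passthrough)
--         if j < n:
--             buf.append(pre_list[j])
--             out.append(" ".join(buf))
--         i = j + 1
--     return out
-- ===== Notes on version B (the rewrite author's own statement) =====
-- stated objective: alternative
-- what changed: A's single loop with a four-part mutable state machine (flag/tag/collect_list and an end-of-iteration flush) is replaced by precomputing each item's effective quote count and then an explicit two-level scan that extracts each quoted span (opener, buffered middle, pass-through two-quote items, closer) as a whole.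
import Mathlib
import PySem

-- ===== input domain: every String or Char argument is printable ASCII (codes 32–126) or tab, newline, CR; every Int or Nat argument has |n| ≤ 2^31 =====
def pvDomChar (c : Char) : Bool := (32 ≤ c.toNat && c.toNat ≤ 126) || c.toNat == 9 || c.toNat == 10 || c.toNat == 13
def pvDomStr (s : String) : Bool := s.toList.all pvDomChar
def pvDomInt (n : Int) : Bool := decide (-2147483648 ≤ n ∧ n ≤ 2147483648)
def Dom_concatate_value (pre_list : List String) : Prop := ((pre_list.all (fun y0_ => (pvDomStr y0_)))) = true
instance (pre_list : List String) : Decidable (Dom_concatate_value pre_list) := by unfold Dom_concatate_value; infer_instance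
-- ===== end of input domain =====

-- B replaces A's four-variable in-loop state machine (flag/tag/collect) by a precomputed
-- quote-count list and an explicit two-level scan that extracts each quoted span as a whole
-- (objective: alternative decomposition, same cost).

-- ===== PORT A =====
-- denote_len computation of A: length of the filtered enumerate comprehension
def pvADenote (item : String) : Nat :=
  if PySem.Str.isIn "'" item then
    ((PySem.List.enumerate item.toList).filter (fun p => p.2 == '\'')).length
  else if PySem.Str.isIn "\"" item then
    ((PySem.List.enumerate item.toList).filter (fun p => p.2 == '"')).length
  else 0

-- one iteration of A's for-loop; state = (pre_list_new, collect_list, flag, tag)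
def pvAStep (st : List String × List String × Bool × Bool) (item : String) :
    List String × List String × Bool × Bool :=
  match st with
  | (out, collect, flag, tag) =>
    let st' :=
      if !(PySem.Str.isIn "'" item) && !(PySem.Str.isIn "\"" item) && flag == false then
        (out ++ [item], collect, flag, tag)
      else if PySem.Str.isIn "'" item || PySem.Str.isIn "\"" item || flag == true then
        let denote := pvADenote item
        if denote == 2 then (out ++ [item], collect, flag, tag)
        else if flag == true && denote == 1 then (out, collect ++ [item], false, true)
        else (out, collect ++ [item], true, tag)
      else (out, collect, flag, tag)
    match st' with
    | (out, collect, flag, tag) =>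
      if flag == false && tag == true then
        (out ++ [PySem.Str.join " " collect], [], flag, false)
      else (out, collect, flag, tag)

def concatate_value (pre_list : List String) : List String :=
  (pre_list.foldl pvAStep ([], [], false, false)).1

-- ===== PORT B =====
-- B's qcount helper
def pvQcount (item : String) : Nat :=
  if PySem.Str.isIn "'" item then item.toList.countP (fun ch => ch == '\'')
  else if PySem.Str.isIn "\"" item then item.toList.countP (fun ch => ch == '"')
  else 0

-- B's inner while-loop: walk the (item, count) tail of a span; two-quote items go to
-- `pass`, others to `buf`, until a one-quote closer (returned with the remaining tail).
def pvInner : List (String × Nat) → List String → List String →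
    List String × List String × Option (String × List (String × Nat))
  | [], pass, buf => (pass, buf, none)
  | (s, c) :: rest, pass, buf =>
    if c == 1 then (pass, buf, some (s, rest))
    else if c == 2 then pvInner rest (pass ++ [s]) buf
    else pvInner rest pass (buf ++ [s])

theorem pvInner_rest_lt : ∀ (l : List (String × Nat)) (pass buf : List String)
    (s : String) (rest' : List (String × Nat)),
    (pvInner l pass buf).2.2 = some (s, rest') → rest'.length < l.length := by
  intro l
  induction l with
  | nil => intro pass buf s rest' h; simp [pvInner] at h
  | cons hd tl ih =>
    intro pass buf s rest' h
    obtain ⟨hs, hc⟩ := hd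
    simp only [pvInner] at h
    split_ifs at h with h1 h2
    · simp at h; simp [h.2]
    · exact Nat.lt_succ_of_lt (ih _ _ _ _ h)
    · exact Nat.lt_succ_of_lt (ih _ _ _ _ h)

-- B's outer while-loop over the annotated list
def pvOuter : List (String × Nat) → List String
  | [] => []
  | (s, c) :: rest =>
    if c == 0 || c == 2 then s :: pvOuter rest
    else
      match h : pvInner rest [] [s] with
      | (pass, buf, some (cl, rest')) =>
        pass ++ [PySem.Str.join " " (buf ++ [cl])] ++ pvOuter rest'
      | (pass, _, none) => pass
termination_by l => l.length
decreasing_by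
  · simp
  · have := pvInner_rest_lt rest [] [s] cl rest' (by rw [h])
    simp; omega

def concatate_value_alt (pre_list : List String) : List String :=
  pvOuter (pre_list.map (fun s => (s, pvQcount s)))

-- ===== PRECONDITION & SPEC =====
def Spec_concatate_value (pre_list : List String) (out : List String) : Prop := out = concatate_value_alt pre_list
instance (pre_list : List String) (out : List String) : Decidable (Spec_concatate_value pre_list out) := by unfold Spec_concatate_value; infer_instance

-- ===== CLAIM (what is proved, stated in full; the proofs are below) =====
def Claim_equal_concatate_value : Prop := ∀ (pre_list : List String), Dom_concatate_value pre_list → Spec_concatate_value pre_list (concatate_value pre_list)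

-- ===== LEMMAS AND PROOFS =====

-- A's enumerate/filter comprehension length = B's character count
theorem pvEnumFilterLen (cs : List Char) (c : Char) : ∀ (k : Int),
    ((PySem.List.enumerate cs k).filter (fun p => p.2 == c)).length
      = cs.countP (fun ch => ch == c) := by
  induction cs with
  | nil => intro k; simp [PySem.List.enumerate_nil]
  | cons hd tl ih =>
    intro k
    simp only [PySem.List.enumerate_cons, List.filter_cons, List.countP_cons]
    by_cases h : hd == c <;> simp [h, ih (k + 1)]

theorem pvDenote_eq (item : String) : pvADenote item = pvQcount item := by
  unfold pvADenote pvQcount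
  split_ifs <;> simp [pvEnumFilterLen]

theorem pvBf {b : Bool} (h : ¬ b = true) : b = false := by simpa using h

theorem pvCountP_ne {cs : List Char} {q : Char}
    (h : PySem.Chars.isIn [q] cs = true) : cs.countP (fun ch => ch == q) ≠ 0 := by
  rw [PySem.Chars.isIn_iff_infix] at h
  have hmem : q ∈ cs := h.sublist.subset (by simp)
  intro hz
  exact absurd (by simp : (fun ch => ch == q) q = true)
    (by simpa using List.countP_eq_zero.mp hz q hmem)

theorem pvIsIn_false_of_qzero {s : String} (h : pvQcount s = 0) :
    PySem.Chars.isIn ['\''] s.toList = false ∧ PySem.Chars.isIn ['"'] s.toList = false := by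
  by_cases hp : PySem.Chars.isIn ['\''] s.toList = true
  · exfalso
    apply pvCountP_ne hp
    have : pvQcount s = s.toList.countP (fun ch => ch == '\'') := by simp [pvQcount, hp]
    omega
  · by_cases hq : PySem.Chars.isIn ['"'] s.toList = true
    · exfalso
      apply pvCountP_ne hq
      have : pvQcount s = s.toList.countP (fun ch => ch == '"') := by
        simp [pvQcount, hq, pvBf hp]
      omega
    · exact ⟨pvBf hp, pvBf hq⟩

-- step characterisations of A's loop body on the two reachable state shapes
theorem pvAStep_f0 {s : String} (h : pvQcount s = 0) (out : List String) :
    pvAStep (out, [], false, false) s = (out ++ [s], [], false, false) := by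
  obtain ⟨hp, hq⟩ := pvIsIn_false_of_qzero h
  simp [pvAStep, hp, hq]

theorem pvAStep_f2 {s : String} (h : pvQcount s = 2) (out collect : List String) (flag : Bool) :
    pvAStep (out, collect, flag, false) s = (out ++ [s], collect, flag, false) := by
  have hd : pvADenote s = 2 := by rw [pvDenote_eq]; exact h
  by_cases hp : PySem.Chars.isIn ['\''] s.toList = true
  · cases flag <;> simp [pvAStep, hp, hd]
  · by_cases hq : PySem.Chars.isIn ['"'] s.toList = true
    · cases flag <;> simp [pvAStep, pvBf hp, hq, hd]
    · exfalso
      have : pvQcount s = 0 := by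
        simp [pvQcount, pvBf hp, pvBf hq]
      omega

theorem pvAStep_fopen {s : String} (h0 : pvQcount s ≠ 0) (h2 : pvQcount s ≠ 2)
    (out : List String) :
    pvAStep (out, [], false, false) s = (out, [s], true, false) := by
  have hd2 : pvADenote s ≠ 2 := by rw [pvDenote_eq]; exact h2
  by_cases hp : PySem.Chars.isIn ['\''] s.toList = true
  · simp [pvAStep, hp, hd2]
  · by_cases hq : PySem.Chars.isIn ['"'] s.toList = true
    · simp [pvAStep, pvBf hp, hq, hd2]
    · exfalso
      apply h0
      simp [pvQcount, pvBf hp, pvBf hq]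

theorem pvAStep_t1 {s : String} (h : pvQcount s = 1) (out buf : List String) :
    pvAStep (out, buf, true, false) s
      = (out ++ [PySem.Str.join " " (buf ++ [s])], [], false, false) := by
  have hd : pvADenote s = 1 := by rw [pvDenote_eq]; exact h
  simp [pvAStep, hd]

theorem pvAStep_tother {s : String} (h1 : pvQcount s ≠ 1) (h2 : pvQcount s ≠ 2)
    (out buf : List String) :
    pvAStep (out, buf, true, false) s = (out, buf ++ [s], true, false) := by
  have hd1 : pvADenote s ≠ 1 := by rw [pvDenote_eq]; exact h1
  have hd2 : pvADenote s ≠ 2 := by rw [pvDenote_eq]; exact h2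
  simp [pvAStep, hd1, hd2]

def pvAnnot (l : List String) : List (String × Nat) := l.map (fun s => (s, pvQcount s))

theorem pvOuter_cons_pass {s : String} {c : Nat} {rest : List (String × Nat)}
    (hc : c = 0 ∨ c = 2) : pvOuter ((s, c) :: rest) = s :: pvOuter rest := by
  rw [pvOuter.eq_def]
  rcases hc with hc | hc <;> simp [hc]

theorem pvOuter_cons_span {s : String} {c : Nat} {rest : List (String × Nat)}
    (hc0 : c ≠ 0) (hc2 : c ≠ 2) :
    pvOuter ((s, c) :: rest) =
      match pvInner rest [] [s] with
      | (pass, buf, some (cl, rest')) =>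
          pass ++ [PySem.Str.join " " (buf ++ [cl])] ++ pvOuter rest'
      | (pass, _, none) => pass := by
  rw [pvOuter.eq_def]
  dsimp only
  rw [if_neg (by simp [hc0, hc2])]
  split <;> rename_i heq <;> simp [heq]

-- the simultaneous loop invariant: A's fold from the idle state matches pvOuter, and from
-- an in-span state matches pvInner followed by the flush and the rest of pvOuter
theorem pvMain : ∀ (l : List String),
    (∀ out, (List.foldl pvAStep (out, [], false, false) l).1 = out ++ pvOuter (pvAnnot l)) ∧
    (∀ out pass buf, (List.foldl pvAStep (out ++ pass, buf, true, false) l).1 =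
      match pvInner (pvAnnot l) pass buf with
      | (p, b, some (cl, rest')) =>
          out ++ p ++ [PySem.Str.join " " (b ++ [cl])] ++ pvOuter rest'
      | (p, _, none) => out ++ p) := by
  intro l
  induction l with
  | nil =>
    constructor
    · intro out; simp [pvAnnot, pvOuter]
    · intro out pass buf; simp [pvAnnot, pvInner]
  | cons s rest ih =>
    obtain ⟨ihP, ihQ⟩ := ih
    have hannot : pvAnnot (s :: rest) = (s, pvQcount s) :: pvAnnot rest := rfl
    constructor
    · intro out
      by_cases hc0 : pvQcount s = 0
      · rw [List.foldl_cons, pvAStep_f0 hc0, ihP, hannot, pvOuter_cons_pass (Or.inl hc0)]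
        simp
      · by_cases hc2 : pvQcount s = 2
        · rw [List.foldl_cons, pvAStep_f2 hc2, ihP, hannot, pvOuter_cons_pass (Or.inr hc2)]
          simp
        · rw [List.foldl_cons, pvAStep_fopen hc0 hc2]
          have hQ := ihQ out [] [s]
          simp only [List.append_nil] at hQ
          rw [hQ, hannot, pvOuter_cons_span hc0 hc2]
          rcases hInner : pvInner (pvAnnot rest) [] [s] with ⟨p, b, cl?⟩
          rcases cl? with _ | ⟨cl, rest'⟩ <;> simp
    · intro out pass buf
      by_cases hc1 : pvQcount s = 1
      · rw [List.foldl_cons, pvAStep_t1 hc1, ihP]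
        simp [hannot, pvInner, hc1]
      · by_cases hc2 : pvQcount s = 2
        · rw [List.foldl_cons, pvAStep_f2 hc2]
          have hQ := ihQ out (pass ++ [s]) buf
          rw [← List.append_assoc] at hQ
          rw [hQ]
          simp [hannot, pvInner, hc2]
        · rw [List.foldl_cons, pvAStep_tother hc1 hc2, ihQ]
          simp [hannot, pvInner, hc1, hc2]

-- ===== VERDICT (by name: the statement is the Claim_ definition above) =====
theorem concatate_value_spec : Claim_equal_concatate_value := by
  intro l _
  unfold Spec_concatate_value concatate_value concatate_value_alt
  have := (pvMain l).1 []
  simpa [pvAnnot] using this
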